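-- pv_equiv track=rewrite | github.com/halleyscommet/microwave | game.py | resize_map
-- ===== SOURCE A (Python) =====
-- def make_blank_map(w, h):
--     grid = [[0 for _ in range(w)] for _ in range(h)]
--     # perimeter walls
--     for x in range(w):
--         grid[0][x] = 1
--         grid[h-1][x] = 1
--     for y in range(h):
--         grid[y][0] = 1
--         grid[y][w-1] = 1
--     # one door at the middle of the top wall
--     if w >= 3:
--         door_x = w // 2
--         grid[0][door_x] = 2
--     return grid
--
-- def resize_map(grid, new_w, new_h):
--     old_h = len(grid); old_w = len(grid[0])
--     new_grid = make_blank_map(new_w, new_h)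
--     for y in range(min(old_h, new_h)):
--         for x in range(min(old_w, new_w)):
--             # keep old interior where possible
--             if 0 < y < new_h-1 and 0 < x < new_w-1:
--                 new_grid[y][x] = grid[y][x]
--     return new_grid
-- ===== SOURCE B (Python) =====
-- def resize_map(grid, new_w, new_h):
--     old_h = len(grid); old_w = len(grid[0])
--     new_grid = []
--     for y in range(new_h):
--         row = []
--         for x in range(new_w):
--             if y == 0 and new_w >= 3 and x == new_w // 2:
--                 row.append(2)          # door at middle of the top wall
--             elif y == 0 or y == new_h - 1 or x == 0 or x == new_w - 1:
--                 row.append(1)          # perimeter wall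
--             elif y < old_h and x < old_w:
--                 row.append(grid[y][x]) # kept old interior
--             else:
--                 row.append(0)          # new empty interior
--         new_grid.append(row)
--     return new_grid
-- ===== Notes on version B (the rewrite author's own statement) =====
-- stated objective: simpler
-- what changed: B computes each output cell once with a direct per-cell case analysis (door/wall/kept interior/empty) in a single nested loop, instead of building a blank walled map with mutation passes and then overwriting the interior.
import Mathlib
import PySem

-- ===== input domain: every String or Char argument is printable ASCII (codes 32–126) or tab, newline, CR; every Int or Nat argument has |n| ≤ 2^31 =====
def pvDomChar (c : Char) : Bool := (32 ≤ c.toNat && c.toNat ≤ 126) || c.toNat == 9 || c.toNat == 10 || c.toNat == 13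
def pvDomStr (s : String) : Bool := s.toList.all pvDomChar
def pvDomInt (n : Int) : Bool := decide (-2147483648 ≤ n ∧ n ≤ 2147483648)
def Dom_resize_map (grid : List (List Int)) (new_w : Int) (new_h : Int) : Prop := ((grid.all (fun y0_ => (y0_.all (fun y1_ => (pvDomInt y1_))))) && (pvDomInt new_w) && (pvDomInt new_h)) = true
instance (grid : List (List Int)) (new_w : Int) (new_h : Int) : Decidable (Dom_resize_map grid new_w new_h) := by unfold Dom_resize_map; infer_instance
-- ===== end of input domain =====

-- B replaces A's blank-map construction + interior-overwrite passes by one nested loop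
-- computing each output cell once (objective: simpler).

-- ===== PORT A =====
-- grid[y][x] = v  (exact for the in-range nonnegative indices Pre_ guarantees)
def pvSet2 (g : List (List Int)) (y x : Int) (v : Int) : List (List Int) :=
  g.set y.toNat ((g.getD y.toNat []).set x.toNat v)

def make_blank_map (w h : Int) : List (List Int) :=
  let g0 := (PySem.List.pyRange 0 h 1).map (fun _ => (PySem.List.pyRange 0 w 1).map (fun _ => (0:Int)))
  let g1 := (PySem.List.pyRange 0 w 1).foldl (fun g x => pvSet2 (pvSet2 g 0 x 1) (h-1) x 1) g0
  let g2 := (PySem.List.pyRange 0 h 1).foldl (fun g y => pvSet2 (pvSet2 g y 0 1) y (w-1) 1) g1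
  if 3 ≤ w then pvSet2 g2 0 (PySem.Int.floordiv w 2) 2 else g2

def resize_map (grid : List (List Int)) (new_w : Int) (new_h : Int) : List (List Int) :=
  let old_h : Int := grid.length
  let old_w : Int := (PySem.List.pyGetD grid 0 []).length
  let ng := make_blank_map new_w new_h
  (PySem.List.pyRange 0 (min old_h new_h) 1).foldl (fun g y =>
    (PySem.List.pyRange 0 (min old_w new_w) 1).foldl (fun g x =>
      if 0 < y ∧ y < new_h - 1 ∧ 0 < x ∧ x < new_w - 1 then
        pvSet2 g y x (PySem.List.pyGetD (PySem.List.pyGetD grid y []) x 0)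
      else g) g) ng

-- ===== PORT B =====
def resize_map_alt (grid : List (List Int)) (new_w : Int) (new_h : Int) : List (List Int) :=
  let old_h : Int := grid.length
  let old_w : Int := (PySem.List.pyGetD grid 0 []).length
  (PySem.List.pyRange 0 new_h 1).foldl (fun ng y =>
    ng ++ [(PySem.List.pyRange 0 new_w 1).foldl (fun row x =>
      row ++ [ if y = 0 ∧ 3 ≤ new_w ∧ x = PySem.Int.floordiv new_w 2 then 2
               else if y = 0 ∨ y = new_h - 1 ∨ x = 0 ∨ x = new_w - 1 then 1
               else if y < old_h ∧ x < old_w then PySem.List.pyGetD (PySem.List.pyGetD grid y []) x 0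
               else 0 ]) []]) []

-- ===== PRECONDITION & SPEC =====
-- Exactly the inputs on which Python A returns: grid nonempty (grid[0] is read), the new sizes
-- both ≥ 1 or both ≤ 0 (otherwise make_blank_map indexes an empty list), and every old row the
-- interior-copy loop reads is long enough for the cells it reads.
def Pre_resize_map (grid : List (List Int)) (new_w : Int) (new_h : Int) : Prop :=
  grid ≠ [] ∧ ((1 ≤ new_w ∧ 1 ≤ new_h) ∨ (new_w ≤ 0 ∧ new_h ≤ 0)) ∧
  ∀ y : Nat, y < grid.length → 1 ≤ y → (y : Int) < new_h - 1 →
    (min (grid.headI.length : Int) (new_w - 1) ≤ ((grid.getD y []).length : Int) ∨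
     min (grid.headI.length : Int) (new_w - 1) ≤ 1)
instance (grid : List (List Int)) (new_w : Int) (new_h : Int) : Decidable (Pre_resize_map grid new_w new_h) := by
  unfold Pre_resize_map; infer_instance
def pvWitness_resize_map : List (List Int) × Int × Int := ([[5, 6, 7], [8, 9, 10]], 4, 4)

def Spec_resize_map (grid : List (List Int)) (new_w : Int) (new_h : Int) (out : List (List Int)) : Prop := out = resize_map_alt grid new_w new_h
instance (grid : List (List Int)) (new_w : Int) (new_h : Int) (out : List (List Int)) : Decidable (Spec_resize_map grid new_w new_h out) := by unfold Spec_resize_map; infer_instance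

-- ===== CLAIM (what is proved, stated in full; the proofs are below) =====
def Claim_equal_resize_map : Prop := ∀ (grid : List (List Int)) (new_w : Int) (new_h : Int), Dom_resize_map grid new_w new_h → Pre_resize_map grid new_w new_h → Spec_resize_map grid new_w new_h (resize_map grid new_w new_h)
-- ===== LEMMAS AND PROOFS =====

-- a grid of h rows of w cells, cell (y,x) holding f y x
def gfun (w h : Nat) (f : Nat → Nat → Int) : List (List Int) :=
  (List.range h).map (fun y => (List.range w).map (fun x => f y x))

theorem gfun_congr {w h : Nat} {f g : Nat → Nat → Int}
    (hfg : ∀ y x, y < h → x < w → f y x = g y x) : gfun w h f = gfun w h g := by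
  unfold gfun
  apply List.ext_getElem (by simp)
  intro y h1 h2
  simp only [List.getElem_map, List.getElem_range]
  apply List.ext_getElem (by simp)
  intro x h3 h4
  simp only [List.getElem_map, List.getElem_range] at *
  exact hfg y x (by simpa using h1) (by simpa using h3)

theorem pvSet2_gfun (w h : Nat) (f : Nat → Nat → Int) (v : Int) (Y X : Nat) :
    pvSet2 (gfun w h f) (Y : Int) (X : Int) v
      = gfun w h (fun y x => if y = Y ∧ x = X ∧ Y < h ∧ X < w then v else f y x) := by
  unfold pvSet2
  simp only [Int.toNat_natCast]
  by_cases hYh : Y < h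
  · have hgetD : (gfun w h f).getD Y [] = (List.range w).map (fun x => f Y x) := by
      rw [List.getD_eq_getElem _ _ (by simp [gfun]; omega)]; simp [gfun]
    rw [hgetD]
    apply List.ext_getElem (by simp [gfun])
    intro y hy1 hy2
    have hyh : y < h := by simpa [gfun] using hy2
    rw [List.getElem_set]
    simp only [gfun, List.getElem_map, List.getElem_range]
    by_cases hyY : Y = y
    · subst hyY
      rw [if_pos rfl]
      apply List.ext_getElem (by simp)
      intro x hx1 hx2
      have hxw : x < w := by simpa using hx2
      rw [List.getElem_set]
      simp only [List.getElem_map, List.getElem_range]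
      by_cases hXx : X = x
      · subst hXx
        simp [hYh, hxw]
      · rw [if_neg hXx, if_neg (by rintro ⟨-, h', -⟩; exact hXx h'.symm)]
    · rw [if_neg hyY]
      apply List.map_congr_left
      intro x _
      rw [if_neg (by tauto)]
  · rw [List.set_eq_of_length_le (by simp [gfun]; omega)]
    exact gfun_congr (by intro y x _ _; rw [if_neg (by omega)])

-- interior-copy loop of A: one row y, x over range n
theorem copy_row (w h : Nat) (f : Nat → Nat → Int) (grid : List (List Int))
    (nw nh : Int) (y : Nat) (n : Nat) :
    (List.range n).foldl (fun g (x : Nat) =>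
        if 0 < (y:Int) ∧ (y:Int) < nh - 1 ∧ 0 < (x:Int) ∧ (x:Int) < nw - 1 then
          pvSet2 g (y:Int) (x:Int) (PySem.List.pyGetD (PySem.List.pyGetD grid (y:Int) []) (x:Int) 0)
        else g) (gfun w h f)
      = gfun w h (fun y' x => if y' = y ∧ x < n ∧ y < h ∧ x < w ∧
            0 < (y:Int) ∧ (y:Int) < nh - 1 ∧ 0 < (x:Int) ∧ (x:Int) < nw - 1 then
          PySem.List.pyGetD (PySem.List.pyGetD grid (y:Int) []) (x:Int) 0 else f y' x) := by
  induction n generalizing f with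
  | zero =>
    simp only [List.range_zero, List.foldl_nil]
    apply gfun_congr
    intro y' x _ _
    rw [if_neg (by omega)]
  | succ n ih =>
    rw [List.range_succ, List.foldl_append, ih]
    simp only [List.foldl_cons, List.foldl_nil]
    by_cases hc : 0 < (y:Int) ∧ (y:Int) < nh - 1 ∧ 0 < (n:Int) ∧ (n:Int) < nw - 1
    · rw [if_pos hc, pvSet2_gfun]
      apply gfun_congr
      intro y' x hy' hx
      by_cases hxn : x = n
      · subst hxn
        split_ifs <;> first | rfl | omega
      · rw [if_neg (by omega)]
        split_ifs <;> first | rfl | omega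
    · rw [if_neg hc]
      apply gfun_congr
      intro y' x hy' hx
      split_ifs <;> first | rfl | omega

-- interior-copy loop of A: all rows
theorem copy_grid (w h : Nat) (f : Nat → Nat → Int) (grid : List (List Int))
    (nw nh : Int) (n nx : Nat) :
    (List.range n).foldl (fun g (y : Nat) =>
      (List.range nx).foldl (fun g (x : Nat) =>
        if 0 < (y:Int) ∧ (y:Int) < nh - 1 ∧ 0 < (x:Int) ∧ (x:Int) < nw - 1 then
          pvSet2 g (y:Int) (x:Int) (PySem.List.pyGetD (PySem.List.pyGetD grid (y:Int) []) (x:Int) 0)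
        else g) g) (gfun w h f)
      = gfun w h (fun y x => if y < n ∧ x < nx ∧ y < h ∧ x < w ∧
            0 < (y:Int) ∧ (y:Int) < nh - 1 ∧ 0 < (x:Int) ∧ (x:Int) < nw - 1 then
          PySem.List.pyGetD (PySem.List.pyGetD grid (y:Int) []) (x:Int) 0 else f y x) := by
  induction n generalizing f with
  | zero =>
    simp only [List.range_zero, List.foldl_nil]
    apply gfun_congr
    intro y x _ _
    rw [if_neg (by omega)]
  | succ n ih =>
    rw [List.range_succ, List.foldl_append, ih]
    simp only [List.foldl_cons, List.foldl_nil]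
    rw [copy_row]
    apply gfun_congr
    intro y x hy hx
    by_cases hyn : y = n
    · subst hyn
      split_ifs <;> first | rfl | omega
    · rw [if_neg (by omega)]
      split_ifs <;> first | rfl | omega

-- wall loop 1 of A (top and bottom rows), x over range n
theorem walls_tb (w h : Nat) (hh : 1 ≤ h) (f : Nat → Nat → Int) (n : Nat) :
    (List.range n).foldl (fun g (x : Nat) => pvSet2 (pvSet2 g 0 (x:Int) 1) ((h:Int)-1) (x:Int) 1) (gfun w h f)
      = gfun w h (fun y x => if (y = 0 ∨ y = h - 1) ∧ x < n ∧ x < w then 1 else f y x) := by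
  induction n generalizing f with
  | zero =>
    simp only [List.range_zero, List.foldl_nil]
    apply gfun_congr
    intro y x _ _
    rw [if_neg (by omega)]
  | succ n ih =>
    rw [List.range_succ, List.foldl_append, ih]
    simp only [List.foldl_cons, List.foldl_nil]
    have h0 : (0:Int) = ((0:Nat):Int) := by norm_num
    have hcast : ((h:Int) - 1) = ((h - 1 : Nat) : Int) := by omega
    rw [h0, pvSet2_gfun, hcast, pvSet2_gfun]
    apply gfun_congr
    intro y x hy hx
    split_ifs <;> first | rfl | omega

-- wall loop 2 of A (left and right columns), y over range n
theorem walls_lr (w h : Nat) (hw : 1 ≤ w) (f : Nat → Nat → Int) (n : Nat) :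
    (List.range n).foldl (fun g (y : Nat) => pvSet2 (pvSet2 g (y:Int) 0 1) (y:Int) ((w:Int)-1) 1) (gfun w h f)
      = gfun w h (fun y x => if y < n ∧ y < h ∧ (x = 0 ∨ x = w - 1) then 1 else f y x) := by
  induction n generalizing f with
  | zero =>
    simp only [List.range_zero, List.foldl_nil]
    apply gfun_congr
    intro y x _ _
    rw [if_neg (by omega)]
  | succ n ih =>
    rw [List.range_succ, List.foldl_append, ih]
    simp only [List.foldl_cons, List.foldl_nil]
    have h0 : (0:Int) = ((0:Nat):Int) := by norm_num
    have hcast : ((w:Int) - 1) = ((w - 1 : Nat) : Int) := by omega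
    rw [h0, pvSet2_gfun, hcast, pvSet2_gfun]
    apply gfun_congr
    intro y x hy hx
    split_ifs <;> first | rfl | omega

-- the blank walled map as a per-cell function
theorem make_blank_map_eq (w h : Nat) (hw : 1 ≤ w) (hh : 1 ≤ h) :
    make_blank_map (w:Int) (h:Int)
      = gfun w h (fun y x =>
          if 3 ≤ w ∧ y = 0 ∧ x = w / 2 then 2
          else if x = 0 ∨ x = w - 1 then 1
          else if y = 0 ∨ y = h - 1 then 1 else 0) := by
  unfold make_blank_map
  rw [PySem.List.pyRange_zero_natCast, PySem.List.pyRange_zero_natCast]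
  simp only [List.foldl_map]
  have hg0 : (List.map (fun _ => List.map (fun _ => (0:Int)) (List.map (fun k : Nat => (k:Int)) (List.range w))) (List.map (fun k : Nat => (k:Int)) (List.range h)))
      = gfun w h (fun _ _ => 0) := by
    simp [gfun, Function.comp_def, List.map_const']
  rw [hg0, walls_tb w h hh, walls_lr w h hw]
  by_cases h3 : 3 ≤ w
  · rw [if_pos (by exact_mod_cast h3)]
    have hfd : PySem.Int.floordiv (w:Int) 2 = ((w / 2 : Nat) : Int) := by
      rw [PySem.Int.floordiv_eq_ediv_of_pos (by omega)]; omega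
    have h0 : (0:Int) = ((0:Nat):Int) := by norm_num
    rw [hfd, h0, pvSet2_gfun]
    apply gfun_congr
    intro y x hy hx
    have hw2 : w / 2 < w := by omega
    split_ifs <;> first | rfl | omega
  · rw [if_neg (by exact_mod_cast h3)]
    apply gfun_congr
    intro y x hy hx
    split_ifs <;> first | rfl | omega

-- port B as a per-cell function
theorem resize_map_alt_eq (grid : List (List Int)) (w h : Nat) :
    resize_map_alt grid (w:Int) (h:Int)
      = gfun w h (fun y x =>
          if (y:Int) = 0 ∧ 3 ≤ (w:Int) ∧ (x:Int) = PySem.Int.floordiv (w:Int) 2 then 2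
          else if (y:Int) = 0 ∨ (y:Int) = (h:Int) - 1 ∨ (x:Int) = 0 ∨ (x:Int) = (w:Int) - 1 then 1
          else if (y:Int) < (grid.length:Int) ∧ (x:Int) < ((PySem.List.pyGetD grid 0 []).length:Int) then
            PySem.List.pyGetD (PySem.List.pyGetD grid (y:Int) []) (x:Int) 0
          else 0) := by
  unfold resize_map_alt gfun
  rw [PySem.List.pyRange_zero_natCast, PySem.List.pyRange_zero_natCast]
  simp only [List.foldl_map]
  rw [PySem.List.foldl_append_singleton_eq_map, List.nil_append]
  apply List.map_congr_left
  intro y _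
  rw [PySem.List.foldl_append_singleton_eq_map, List.nil_append]

theorem resize_map_spec_aux (grid : List (List Int)) (w h : Nat) (hw : 1 ≤ w) (hh : 1 ≤ h) :
    resize_map grid (w:Int) (h:Int) = resize_map_alt grid (w:Int) (h:Int) := by
  unfold resize_map
  rw [resize_map_alt_eq grid w h, make_blank_map_eq w h hw hh]
  have hmin1 : min (grid.length:Int) (h:Int) = ((min grid.length h : Nat) : Int) := by omega
  have hmin2 : min ((PySem.List.pyGetD grid 0 []).length:Int) (w:Int)
      = ((min (PySem.List.pyGetD grid 0 []).length w : Nat) : Int) := by omega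
  simp only [hmin1, hmin2]
  rw [PySem.List.pyRange_zero_natCast, PySem.List.pyRange_zero_natCast]
  simp only [List.foldl_map]
  rw [copy_grid]
  apply gfun_congr
  intro y x hy hx
  have hfd : PySem.Int.floordiv (w:Int) 2 = ((w / 2 : Nat) : Int) := by
    rw [PySem.Int.floordiv_eq_ediv_of_pos (by omega)]; omega
  by_cases hcopy : 0 < y ∧ y < h - 1 ∧ 0 < x ∧ x < w - 1 ∧ y < grid.length ∧ x < (PySem.List.pyGetD grid 0 []).length
  · rw [if_pos (by constructor <;> omega)]
    rw [if_neg (by rw [hfd]; omega), if_neg (by omega), if_pos (by omega)]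
  · rw [if_neg (by omega)]
    rw [hfd]
    split_ifs <;> first | rfl | omega

-- ===== VERDICT (by name: the statement is the Claim_ definition above) =====
theorem resize_map_spec : Claim_equal_resize_map := by
  intro grid new_w new_h _ hpre
  unfold Spec_resize_map
  obtain ⟨hne, hsign, _⟩ := hpre
  rcases hsign with ⟨hw, hh⟩ | ⟨hw, hh⟩
  · obtain ⟨w, rfl⟩ : ∃ w : Nat, new_w = (w:Int) := ⟨new_w.toNat, by omega⟩
    obtain ⟨h, rfl⟩ : ∃ h : Nat, new_h = (h:Int) := ⟨new_h.toNat, by omega⟩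
    exact resize_map_spec_aux grid w h (by omega) (by omega)
  · have hrw : PySem.List.pyRange 0 new_w 1 = [] := by
      rw [PySem.List.pyRange_one]; simp; omega
    have hrh : PySem.List.pyRange 0 new_h 1 = [] := by
      rw [PySem.List.pyRange_one]; simp; omega
    have hrmin : PySem.List.pyRange 0 (min (grid.length:Int) new_h) 1 = [] := by
      rw [PySem.List.pyRange_one]; simp; omega
    have h3 : ¬ (3:Int) ≤ new_w := by omega
    simp [resize_map, resize_map_alt, make_blank_map, hrw, hrh, hrmin, h3]
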